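-- pv_equiv track=rewrite | github.com/Vicky-Dai/Vicky-Happy-Leetcode | Graph Theory/694. Number of Distinct islands.py | numDistinctIslands
-- ===== SOURCE A (Python) =====
-- def numDistinctIslands(grid):
--     shapes = set()
--     rows = len(grid)
--     cols = len(grid[0])
--
--     def dfs(i, j, path, dir):
--         # 超出边界或遇到水（0）或已访问过（2），直接返回
--         if i < 0 or i >= rows or j < 0 or j >= cols or grid[i][j] != 1:
--             return
--
--         # 标记当前陆地为已访问
--         grid[i][j] = 2
--         path.append(dir)
--
--         # 四个方向搜索
--         dfs(i, j - 1, path, 'l')  # 左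
--         dfs(i + 1, j, path, 'd')  # 下
--         dfs(i, j + 1, path, 'r')  # 右
--         dfs(i - 1, j, path, 'u')  # 上
--
--         # 回溯标记
--         path.append('b')
--
--     for i in range(rows):
--         for j in range(cols):
--             if grid[i][j] == 1:
--                 path = []
--                 dfs(i, j, path, 'o')  # 'o' 表示起点
--                 shapes.add(''.join(path))
--
--     return len(shapes)
-- ===== SOURCE B (Python) =====
-- def numDistinctIslands(grid):
--     # Iterative explicit-stack DFS (same path-string signature); return value only, mutates grid like A.
--     shapes = set()
--     rows = len(grid)
--     cols = len(grid[0])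
--     for i in range(rows):
--         for j in range(cols):
--             if grid[i][j] == 1:
--                 path = []
--                 stack = [(i, j, 'o')]
--                 while stack:
--                     item = stack.pop()
--                     if item is None:
--                         path.append('b')
--                         continue
--                     x, y, d = item
--                     if x < 0 or x >= rows or y < 0 or y >= cols or grid[x][y] != 1:
--                         continue
--                     grid[x][y] = 2
--                     path.append(d)
--                     stack.extend([None, (x - 1, y, 'u'), (x, y + 1, 'r'), (x + 1, y, 'd'), (x, y - 1, 'l')])
--                 shapes.add(''.join(path))
--     return len(shapes)
-- ===== Notes on version B (the rewrite author's own statement) =====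
-- stated objective: alternative
-- what changed: A's recursive backtracking DFS is replaced by an iterative DFS driven by an explicit stack of pending cells with a None backtrack marker, producing the identical path-string signature.
import Mathlib
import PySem

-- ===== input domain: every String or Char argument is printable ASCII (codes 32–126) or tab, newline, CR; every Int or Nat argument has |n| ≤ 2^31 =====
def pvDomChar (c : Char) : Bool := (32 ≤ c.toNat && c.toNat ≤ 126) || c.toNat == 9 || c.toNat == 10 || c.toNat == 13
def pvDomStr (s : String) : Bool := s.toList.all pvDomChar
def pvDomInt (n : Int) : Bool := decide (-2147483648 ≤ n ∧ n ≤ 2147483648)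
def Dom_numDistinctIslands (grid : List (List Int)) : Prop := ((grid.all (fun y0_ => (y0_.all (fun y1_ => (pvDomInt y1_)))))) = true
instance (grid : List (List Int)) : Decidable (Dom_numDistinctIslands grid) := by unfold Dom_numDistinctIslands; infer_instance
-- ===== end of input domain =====

-- B replaces A's recursive DFS by an iterative explicit-stack DFS (same path-string
-- signature, same complexity; objective: alternative decomposition). Both Pythons
-- mutate `grid` in place identically; the theorems are about the return value.

-- ===== PORT A =====
-- grid[i][j] (only evaluated with 0 ≤ i, 0 ≤ j; total default 0 is exact inside Pre_)
def pvCell (g : List (List Int)) (i j : Int) : Int :=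
  (g.getD i.toNat []).getD j.toNat 0

-- grid[i][j] = v
def pvSet (g : List (List Int)) (i j : Int) (v : Int) : List (List Int) :=
  g.set i.toNat ((g.getD i.toNat []).set j.toNat v)

-- the recursive dfs of A; fuel bounds the recursion depth (proved sufficient below)
def dfsA (rows cols : Int) : Nat → Int → Int → Char → List (List Int) → List Char →
    List (List Int) × List Char
  | 0, _, _, _, g, path => (g, path)
  | fuel + 1, i, j, d, g, path =>
    if i < 0 ∨ rows ≤ i ∨ j < 0 ∨ cols ≤ j ∨ pvCell g i j ≠ 1 then (g, path)
    else
      let g1 := pvSet g i j 2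
      let p1 := path ++ [d]
      let r1 := dfsA rows cols fuel i (j - 1) 'l' g1 p1
      let r2 := dfsA rows cols fuel (i + 1) j 'd' r1.1 r1.2
      let r3 := dfsA rows cols fuel i (j + 1) 'r' r2.1 r2.2
      let r4 := dfsA rows cols fuel (i - 1) j 'u' r3.1 r3.2
      (r4.1, r4.2 ++ ['b'])

def numDistinctIslands (grid : List (List Int)) : Int :=
  let rows : Int := grid.length
  let cols : Int := (grid.headD []).length
  let fuel : Nat := grid.length * (grid.headD []).length + 1
  let final :=
    (PySem.List.pyRange 0 rows 1).foldl (fun st i =>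
      (PySem.List.pyRange 0 cols 1).foldl (fun st j =>
        if pvCell st.1 i j = 1 then
          let r := dfsA rows cols fuel i j 'o' st.1 []
          (r.1, PySem.Set.add st.2 (String.ofList r.2))
        else st) st)
      ((grid, PySem.Set.empty) : List (List Int) × PySem.Set String)
  (PySem.Set.len final.2 : Int)

-- ===== PORT B =====
-- number of live 1-cells inside the rows × cols window (termination measure for runB)
def pvOnes (cols : Int) (g : List (List Int)) : Nat :=
  (g.map (fun r => (r.take cols.toNat).count 1)).sum

theorem pvCount_set_lt : ∀ (l : List Int) (n : Nat), n < l.length → l.getD n 0 = 1 →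
    (l.set n 2).count 1 < l.count 1 := by
  intro l
  induction l with
  | nil => intro n hn; simp at hn
  | cons a t ih =>
    intro n hn h1
    cases n with
    | zero =>
      simp at h1
      simp [h1]
    | succ m =>
      simp at hn h1
      have := ih m hn h1
      simp [List.count_cons]
      omega

theorem pvSum_map_set (f : List Int → Nat) : ∀ (l : List (List Int)) (n : Nat) (a : List Int),
    n < l.length →
    ((l.set n a).map f).sum + f (l.getD n []) = (l.map f).sum + f a := by
  intro l
  induction l with
  | nil => intro n a hn; simp at hn
  | cons b t ih =>
    intro n a hn
    cases n with
    | zero => simp; omega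
    | succ m =>
      simp at hn
      have := ih m a hn
      simp at this ⊢
      omega

theorem pvOnes_set_lt (cols : Int) (g : List (List Int)) (x y : Int)
    (hy0 : 0 ≤ y) (hyc : y < cols) (hc : pvCell g x y = 1) :
    pvOnes cols (pvSet g x y 2) < pvOnes cols g := by
  unfold pvCell at hc
  have hx : x.toNat < g.length := by
    by_contra hx
    rw [List.getD_eq_default g [] (n := x.toNat) (by omega)] at hc
    simp at hc
  set row := g.getD x.toNat [] with hrow
  have hyr : y.toNat < row.length := by
    by_contra hyr
    rw [List.getD_eq_default row 0 (n := y.toNat) (by omega)] at hc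
    simp at hc
  have hyc' : y.toNat < cols.toNat := by omega
  have key := pvSum_map_set (fun r => (r.take cols.toNat).count 1) g x.toNat
      (row.set y.toNat 2) hx
  have hlt : ((row.set y.toNat 2).take cols.toNat).count 1 < (row.take cols.toNat).count 1 := by
    rw [List.take_set]
    apply pvCount_set_lt
    · simp; omega
    · rw [List.getD_eq_getElem _ _ (by simp; omega), List.getElem_take,
        ← List.getD_eq_getElem _ 0 (by omega)]
      exact hc
  rw [← hrow] at key
  beta_reduce at key hlt
  unfold pvOnes pvSet
  rw [← hrow]
  omega

-- the explicit stack machine of B: `none` is the backtrack marker, head = top of stack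
def runB (rows cols : Int) (g : List (List Int))
    (stack : List (Option (Int × Int × Char))) (path : List Char) :
    List (List Int) × List Char :=
  match stack with
  | [] => (g, path)
  | none :: rest => runB rows cols g rest (path ++ ['b'])
  | some (x, y, d) :: rest =>
    if h : x < 0 ∨ rows ≤ x ∨ y < 0 ∨ cols ≤ y ∨ pvCell g x y ≠ 1 then
      runB rows cols g rest path
    else
      runB rows cols (pvSet g x y 2)
        (some (x, y - 1, 'l') :: some (x + 1, y, 'd') :: some (x, y + 1, 'r') ::
          some (x - 1, y, 'u') :: none :: rest)
        (path ++ [d])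
termination_by stack.length + 6 * pvOnes cols g
decreasing_by
  · simp
  · simp
  · push Not at h
    have := pvOnes_set_lt cols g x y h.2.2.1 h.2.2.2.1 h.2.2.2.2
    simp; omega

def numDistinctIslands_alt (grid : List (List Int)) : Int :=
  let rows : Int := grid.length
  let cols : Int := (grid.headD []).length
  let final :=
    (PySem.List.pyRange 0 rows 1).foldl (fun st i =>
      (PySem.List.pyRange 0 cols 1).foldl (fun st j =>
        if pvCell st.1 i j = 1 then
          let r := runB rows cols st.1 [some (i, j, 'o')] []
          (r.1, PySem.Set.add st.2 (String.ofList r.2))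
        else st) st)
      ((grid, PySem.Set.empty) : List (List Int) × PySem.Set String)
  (PySem.Set.len final.2 : Int)

-- ===== PRECONDITION & SPEC =====
-- Pre_ excludes exactly the inputs on which the Python raises IndexError: the empty
-- grid (grid[0]) and grids with a row shorter than len(grid[0]).
def Pre_numDistinctIslands (grid : List (List Int)) : Prop :=
  grid ≠ [] ∧ ∀ row ∈ grid, (grid.headD []).length ≤ row.length
instance (grid : List (List Int)) : Decidable (Pre_numDistinctIslands grid) := by
  unfold Pre_numDistinctIslands; infer_instance

def pvWitness_numDistinctIslands : List (List Int) := [[1, 0, 1], [0, 1, 1]]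

def Spec_numDistinctIslands (grid : List (List Int)) (out : Int) : Prop :=
  out = numDistinctIslands_alt grid
instance (grid : List (List Int)) (out : Int) : Decidable (Spec_numDistinctIslands grid out) := by
  unfold Spec_numDistinctIslands; infer_instance

-- ===== CLAIM (what is proved, stated in full; the proofs are below) =====
def Claim_equal_numDistinctIslands : Prop := ∀ (grid : List (List Int)),
  Dom_numDistinctIslands grid → Pre_numDistinctIslands grid →
    Spec_numDistinctIslands grid (numDistinctIslands grid)

-- ===== LEMMAS AND PROOFS =====

theorem pvSet_length (g : List (List Int)) (i j v) : (pvSet g i j v).length = g.length := by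
  simp [pvSet]

theorem dfsA_length (rows cols : Int) : ∀ (fuel : Nat) (i j : Int) (d : Char) g p,
    ((dfsA rows cols fuel i j d g p).1).length = g.length := by
  intro fuel
  induction fuel with
  | zero => intro i j d g p; rfl
  | succ f ih =>
    intro i j d g p
    rw [dfsA]
    split
    · rfl
    · simp only []
      rw [ih, ih, ih, ih, pvSet_length]

theorem dfsA_ones_le (rows cols : Int) : ∀ (fuel : Nat) (i j : Int) (d : Char) g p,
    pvOnes cols (dfsA rows cols fuel i j d g p).1 ≤ pvOnes cols g := by
  intro fuel
  induction fuel with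
  | zero => intro i j d g p; exact le_rfl
  | succ f ih =>
    intro i j d g p
    rw [dfsA]
    split
    · exact le_rfl
    · rename_i h
      push Not at h
      simp only []
      have h0 := pvOnes_set_lt cols g i j h.2.2.1 h.2.2.2.1 h.2.2.2.2
      set g1 := pvSet g i j 2 with hg1
      have h1 := ih i (j - 1) 'l' g1 (p ++ [d])
      set r1 := dfsA rows cols f i (j - 1) 'l' g1 (p ++ [d]) with hr1
      have h2 := ih (i + 1) j 'd' r1.1 r1.2
      set r2 := dfsA rows cols f (i + 1) j 'd' r1.1 r1.2 with hr2
      have h3 := ih i (j + 1) 'r' r2.1 r2.2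
      set r3 := dfsA rows cols f i (j + 1) 'r' r2.1 r2.2 with hr3
      have h4 := ih (i - 1) j 'u' r3.1 r3.2
      omega

theorem runB_back (rows cols : Int) (g : List (List Int)) (rest path) :
    runB rows cols g (none :: rest) path = runB rows cols g rest (path ++ ['b']) := by
  rw [runB]

theorem runB_nil (rows cols : Int) (g : List (List Int)) (path) :
    runB rows cols g [] path = (g, path) := by
  rw [runB]

theorem runB_sim (rows cols : Int) : ∀ (N : Nat) (g : List (List Int)),
    pvOnes cols g ≤ N → ∀ (fuel : Nat), pvOnes cols g < fuel →
    ∀ (i j : Int) (d : Char) rest path,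
      runB rows cols g (some (i, j, d) :: rest) path =
        runB rows cols (dfsA rows cols fuel i j d g path).1 rest
          (dfsA rows cols fuel i j d g path).2 := by
  intro N
  induction N with
  | zero =>
    intro g hN fuel hf i j d rest path
    obtain ⟨f, rfl⟩ : ∃ f, fuel = f + 1 := ⟨fuel - 1, by omega⟩
    rw [runB, dfsA]
    by_cases h : i < 0 ∨ rows ≤ i ∨ j < 0 ∨ cols ≤ j ∨ pvCell g i j ≠ 1
    · rw [dif_pos h, if_pos h]
    · exfalso
      push Not at h
      have := pvOnes_set_lt cols g i j h.2.2.1 h.2.2.2.1 h.2.2.2.2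
      omega
  | succ N ih =>
    intro g hN fuel hf i j d rest path
    obtain ⟨f, rfl⟩ : ∃ f, fuel = f + 1 := ⟨fuel - 1, by omega⟩
    rw [runB, dfsA]
    by_cases h : i < 0 ∨ rows ≤ i ∨ j < 0 ∨ cols ≤ j ∨ pvCell g i j ≠ 1
    · rw [dif_pos h, if_pos h]
    · rw [dif_neg h, if_neg h]
      simp only []
      push Not at h
      have hlt := pvOnes_set_lt cols g i j h.2.2.1 h.2.2.2.1 h.2.2.2.2
      set g1 := pvSet g i j 2 with hg1
      set p1 := path ++ [d] with hp1
      have e1 := ih g1 (by omega) f (by omega) i (j - 1) 'l'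
        (some (i + 1, j, 'd') :: some (i, j + 1, 'r') :: some (i - 1, j, 'u') :: none :: rest) p1
      set r1 := dfsA rows cols f i (j - 1) 'l' g1 p1 with hr1
      have m1 : pvOnes cols r1.1 ≤ pvOnes cols g1 := dfsA_ones_le rows cols f i (j - 1) 'l' g1 p1
      have e2 := ih r1.1 (by omega) f (by omega) (i + 1) j 'd'
        (some (i, j + 1, 'r') :: some (i - 1, j, 'u') :: none :: rest) r1.2
      set r2 := dfsA rows cols f (i + 1) j 'd' r1.1 r1.2 with hr2
      have m2 : pvOnes cols r2.1 ≤ pvOnes cols r1.1 := dfsA_ones_le rows cols f (i + 1) j 'd' r1.1 r1.2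
      have e3 := ih r2.1 (by omega) f (by omega) i (j + 1) 'r'
        (some (i - 1, j, 'u') :: none :: rest) r2.2
      set r3 := dfsA rows cols f i (j + 1) 'r' r2.1 r2.2 with hr3
      have m3 : pvOnes cols r3.1 ≤ pvOnes cols r2.1 := dfsA_ones_le rows cols f i (j + 1) 'r' r2.1 r2.2
      have e4 := ih r3.1 (by omega) f (by omega) (i - 1) j 'u' (none :: rest) r3.2
      set r4 := dfsA rows cols f (i - 1) j 'u' r3.1 r3.2 with hr4
      rw [e1, e2, e3, e4, runB_back]

theorem pvOnes_le_bound (cols : Int) (g : List (List Int)) :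
    pvOnes cols g ≤ g.length * cols.toNat := by
  unfold pvOnes
  calc (g.map (fun r => (r.take cols.toNat).count 1)).sum
      ≤ (g.map (fun r => (r.take cols.toNat).count 1)).length * cols.toNat := by
        refine le_trans (List.sum_le_card_nsmul _ cols.toNat ?_) (by simp)
        intro x hx
        simp at hx
        obtain ⟨r, _, rfl⟩ := hx
        exact le_trans List.count_le_length (List.length_take_le _ _)
    _ = g.length * cols.toNat := by simp

theorem pvFoldl_inv_congr {α σ : Type} (P : σ → Prop) (f g : σ → α → σ)
    (hstep : ∀ s a, P s → f s a = g s a ∧ P (f s a)) :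
    ∀ (xs : List α) (s : σ), P s → xs.foldl f s = xs.foldl g s ∧ P (xs.foldl f s) := by
  intro xs
  induction xs with
  | nil => intro s hs; exact ⟨rfl, hs⟩
  | cons a t ih =>
    intro s hs
    obtain ⟨he, hp⟩ := hstep s a hs
    obtain ⟨he2, hp2⟩ := ih (f s a) hp
    exact ⟨by simp only [List.foldl_cons, ← he, he2], hp2⟩

-- ===== VERDICT (by name: the statement is the Claim_ definition above) =====
theorem numDistinctIslands_spec : Claim_equal_numDistinctIslands := by
  intro grid _ _
  unfold Spec_numDistinctIslands numDistinctIslands numDistinctIslands_alt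
  simp only []
  set rows : Int := (grid.length : Int) with hrows
  set cols : Int := ((grid.headD []).length : Int) with hcols
  set fuel : Nat := grid.length * (grid.headD []).length + 1 with hfuel
  have key := pvFoldl_inv_congr (α := Int) (σ := List (List Int) × PySem.Set String)
    (fun st => st.1.length = grid.length)
    (fun st i =>
      (PySem.List.pyRange 0 cols 1).foldl (fun st j =>
        if pvCell st.1 i j = 1 then
          let r := dfsA rows cols fuel i j 'o' st.1 []
          (r.1, PySem.Set.add st.2 (String.ofList r.2))
        else st) st)
    (fun st i =>
      (PySem.List.pyRange 0 cols 1).foldl (fun st j =>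
        if pvCell st.1 i j = 1 then
          let r := runB rows cols st.1 [some (i, j, 'o')] []
          (r.1, PySem.Set.add st.2 (String.ofList r.2))
        else st) st)
    (fun st i hst => by
      refine pvFoldl_inv_congr (α := Int) (σ := List (List Int) × PySem.Set String)
        (fun st => st.1.length = grid.length) _ _ (fun s j hs => ?_) _ st hst
      by_cases hc : pvCell s.1 i j = 1
      · simp only [if_pos hc]
        have hbound : pvOnes cols s.1 < fuel := by
          have hb := pvOnes_le_bound cols s.1
          have hcn : cols.toNat = (grid.headD []).length := by
            rw [hcols]; exact Int.toNat_natCast _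
          rw [hs, hcn] at hb
          omega
        have hsim := runB_sim rows cols (pvOnes cols s.1) s.1 le_rfl fuel hbound i j 'o' [] []
        rw [runB_nil] at hsim
        refine ⟨by simp only [hsim], ?_⟩
        show (dfsA rows cols fuel i j 'o' s.1 []).1.length = grid.length
        rw [dfsA_length]
        exact hs
      · simp only [if_neg hc]
        exact ⟨trivial, hs⟩)
    (PySem.List.pyRange 0 rows 1)
    (grid, PySem.Set.empty) rfl
  rw [key.1]
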